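-- pv_equiv track=rewrite | github.com/yuta1331/python_asobi | staircase.py | NewStair
-- ===== SOURCE A (Python) =====
-- def NewStair(n):
--   stairs = {1: 1, 2: 2, 3: 4} # {step_num, total}
--   if n == 1: return 1
--   if n == 2: return 2
--   if n == 3: return 4
--   else:
--     for i in range(4, n+1):
--       stairs[i] = stairs[i-1] + stairs[i-2] + stairs[i-3]
--     return stairs[n]
-- ===== SOURCE B (Python) =====
-- # 3x3 matrix exponentiation of the tribonacci-style recurrence: O(log n) instead of A's O(n) loop.
-- def NewStair(n):
--     def mul(A, B):
--         return tuple(tuple(sum(A[i][k] * B[k][j] for k in range(3)) for j in range(3)) for i in range(3))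
--     M = ((1, 1, 1), (1, 0, 0), (0, 1, 0))
--     R = ((1, 0, 0), (0, 1, 0), (0, 0, 1))
--     e = n
--     while e > 0:
--         if e % 2 == 1:
--             R = mul(R, M)
--         M = mul(M, M)
--         e //= 2
--     # R = M0^n; M0^n · (2, 1, 1) = (T(n+2), T(n+1), T(n)) with T(1)=1, T(2)=2, T(3)=4
--     return R[2][0] * 2 + R[2][1] * 1 + R[2][2] * 1
-- ===== Notes on version B (the rewrite author's own statement) =====
-- stated objective: faster
-- what changed: Replaces A's O(n) dictionary-filling loop over the tribonacci-style recurrence with 3x3 integer matrix exponentiation by repeated squaring.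
-- crash fix: For n <= 0 A raises KeyError on stairs[n]; B returns 1 (the identity matrix applied to the seed vector). — e.g. on NewStair(0): A raises KeyError, B returns 1
import Mathlib
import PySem

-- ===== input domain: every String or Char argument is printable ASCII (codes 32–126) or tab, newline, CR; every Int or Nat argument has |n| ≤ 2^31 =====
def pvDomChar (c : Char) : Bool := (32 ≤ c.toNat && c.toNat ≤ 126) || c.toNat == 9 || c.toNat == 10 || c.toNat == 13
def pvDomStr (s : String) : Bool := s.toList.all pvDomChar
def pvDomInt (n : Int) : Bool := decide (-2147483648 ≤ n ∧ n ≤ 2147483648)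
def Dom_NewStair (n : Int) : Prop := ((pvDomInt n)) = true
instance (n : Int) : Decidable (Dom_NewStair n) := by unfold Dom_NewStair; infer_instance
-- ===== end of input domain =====

-- B replaces A's O(n) dictionary loop by 3x3 matrix exponentiation of the same linear recurrence (O(log n) multiplications).

-- ===== PORT A =====
-- literal port of A: dict {1:1,2:2,3:4}, early returns, loop i = 4..n filling stairs[i], then stairs[n].
-- The dict is internal state only (point stores and point lookups; insertion order and iteration are never
-- observed), so it is ported as Std.HashMap — exact for this use.  stairs[n] would be a KeyError for n ≤ 0 —
-- those inputs are excluded by Pre_NewStair; the .getD default 0 is never reached inside Pre_.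
def NewStair (n : Int) : Int :=
  let stairs : Std.HashMap Int Int := (((∅ : Std.HashMap Int Int).insert 1 1).insert 2 2).insert 3 4
  if n = 1 then 1
  else if n = 2 then 2
  else if n = 3 then 4
  else
    let stairs := (PySem.List.pyRange 4 (n + 1) 1).foldl
      (fun d i => d.insert i (d.getD (i - 1) 0 + d.getD (i - 2) 0 + d.getD (i - 3) 0)) stairs
    (stairs.getD n 0)

-- ===== PORT B =====
-- 3x3 integer matrix, rows (a b c / d e f / g h i); mmul is Source B's mul written out entrywise
structure Mat3 where
  a : Int
  b : Int
  c : Int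
  d : Int
  e : Int
  f : Int
  g : Int
  h : Int
  i : Int
deriving DecidableEq, Repr

def mmul (X Y : Mat3) : Mat3 :=
  ⟨X.a*Y.a + X.b*Y.d + X.c*Y.g, X.a*Y.b + X.b*Y.e + X.c*Y.h, X.a*Y.c + X.b*Y.f + X.c*Y.i,
   X.d*Y.a + X.e*Y.d + X.f*Y.g, X.d*Y.b + X.e*Y.e + X.f*Y.h, X.d*Y.c + X.e*Y.f + X.f*Y.i,
   X.g*Y.a + X.h*Y.d + X.i*Y.g, X.g*Y.b + X.h*Y.e + X.i*Y.h, X.g*Y.c + X.h*Y.f + X.i*Y.i⟩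

def mId : Mat3 := ⟨1,0,0, 0,1,0, 0,0,1⟩
def mStep : Mat3 := ⟨1,1,1, 1,0,0, 0,1,0⟩

-- Source B's 'while e > 0' loop (e halves each round; negative/zero e skips the loop, like Python)
def powLoop (e : Nat) (M R : Mat3) : Mat3 :=
  if h : e = 0 then R
  else powLoop (e / 2) (mmul M M) (if e % 2 = 1 then mmul R M else R)
termination_by e
decreasing_by exact Nat.div_lt_self (Nat.pos_of_ne_zero h) (by norm_num)

def NewStair_alt (n : Int) : Int :=
  let R := powLoop n.toNat mStep mId
  R.g * 2 + R.h * 1 + R.i * 1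

-- ===== PRECONDITION & SPEC =====
-- Pre_ excludes exactly n ≤ 0, where A raises KeyError (stairs[n] was never filled in).
def Pre_NewStair (n : Int) : Prop := 1 ≤ n
instance (n : Int) : Decidable (Pre_NewStair n) := by unfold Pre_NewStair; infer_instance
def pvWitness_NewStair : Int := 5

-- For n ≤ 0 A raises KeyError on stairs[n]; B returns 1 (the empty-climb count, M^0 applied to the seed).
def Raises_NewStair (n : Int) : Prop := n ≤ 0
instance (n : Int) : Decidable (Raises_NewStair n) := by unfold Raises_NewStair; infer_instance
def pvRaiseWitness_NewStair : Int := 0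
def pvRaiseWitnessOut_NewStair : Int := 1

def Spec_NewStair (n : Int) (out : Int) : Prop := out = NewStair_alt n
instance (n : Int) (out : Int) : Decidable (Spec_NewStair n out) := by unfold Spec_NewStair; infer_instance

-- ===== CLAIM (what is proved, stated in full; the proofs are below) =====
def Claim_equal_NewStair : Prop := ∀ (n : Int), Dom_NewStair n → Pre_NewStair n → Spec_NewStair n (NewStair n)
def Claim_raises_NewStair : Prop := (∀ (n : Int), Dom_NewStair n → Raises_NewStair n → ¬ Pre_NewStair n) ∧ (Dom_NewStair (pvRaiseWitness_NewStair) ∧ Raises_NewStair (pvRaiseWitness_NewStair) ∧ NewStair_alt (pvRaiseWitness_NewStair) = pvRaiseWitnessOut_NewStair)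

-- ===== LEMMAS AND PROOFS =====

-- the recurrence both programs compute
def trib : Nat → Int
  | 0 => 1
  | 1 => 1
  | 2 => 2
  | k + 3 => trib (k + 2) + trib (k + 1) + trib k

theorem mmul_id_left (X : Mat3) : mmul mId X = X := by
  cases X; simp [mmul, mId]

theorem mmul_id_right (X : Mat3) : mmul X mId = X := by
  cases X; simp [mmul, mId]

theorem mmul_assoc (X Y Z : Mat3) : mmul (mmul X Y) Z = mmul X (mmul Y Z) := by
  cases X; cases Y; cases Z
  simp only [mmul, Mat3.mk.injEq]
  refine ⟨?_, ?_, ?_, ?_, ?_, ?_, ?_, ?_, ?_⟩ <;> ring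

def mpow (M : Mat3) : Nat → Mat3
  | 0 => mId
  | k + 1 => mmul M (mpow M k)

theorem mpow_add (M : Mat3) (a b : Nat) : mpow M (a + b) = mmul (mpow M a) (mpow M b) := by
  induction a with
  | zero => simp [mpow, mmul_id_left]
  | succ a ih =>
      have : a + 1 + b = (a + b) + 1 := by omega
      rw [this, mpow, ih, mpow, mmul_assoc]

theorem mpow_sq (M : Mat3) (k : Nat) : mpow (mmul M M) k = mpow M (2 * k) := by
  induction k with
  | zero => rfl
  | succ k ih =>
      have h2 : mpow M 2 = mmul M M := by simp [mpow, mmul_id_right]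
      have : 2 * (k + 1) = 2 + 2 * k := by omega
      rw [mpow, ih, this, mpow_add, h2]

theorem powLoop_eq (e : Nat) : ∀ M R, powLoop e M R = mmul R (mpow M e) := by
  induction e using Nat.strong_induction_on with
  | _ e ih =>
      intro M R
      by_cases h : e = 0
      · subst h; rw [powLoop]; simp [mpow, mmul_id_right]
      · rw [powLoop]
        simp only [h, dite_false]
        rw [ih (e / 2) (Nat.div_lt_self (Nat.pos_of_ne_zero h) (by norm_num)), mpow_sq]
        by_cases hodd : e % 2 = 1
        · simp only [hodd, if_true]
          have he : e = 2 * (e / 2) + 1 := by omega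
          conv_rhs => rw [he]
          rw [Nat.add_comm (2 * (e / 2)) 1, mpow_add, mmul_assoc]
          congr 1
          simp [mpow, mmul_id_right]
        · simp only [hodd, if_false]
          have he : e = 2 * (e / 2) := by omega
          conv_rhs => rw [he]

theorem mpow_row (k : Nat) :
    (mpow mStep k).g * 2 + (mpow mStep k).h + (mpow mStep k).i = trib k ∧
    (mpow mStep k).d * 2 + (mpow mStep k).e + (mpow mStep k).f = trib (k + 1) ∧
    (mpow mStep k).a * 2 + (mpow mStep k).b + (mpow mStep k).c = trib (k + 2) := by
  induction k with
  | zero => simp [mpow, mId, trib]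
  | succ k ih =>
      obtain ⟨h0, h1, h2⟩ := ih
      refine ⟨?_, ?_, ?_⟩
      · simpa [mpow, mmul, mStep] using h1
      · simpa [mpow, mmul, mStep] using h2
      · show (mmul mStep (mpow mStep k)).a * 2 + (mmul mStep (mpow mStep k)).b +
          (mmul mStep (mpow mStep k)).c = trib (k + 1 + 2)
        have ht : trib (k + 3) = trib (k + 2) + trib (k + 1) + trib k := by rw [trib]
        set P := mpow mStep k with hP
        simp only [mmul, mStep]
        rw [show k + 1 + 2 = k + 3 from by omega]
        omega

theorem alt_eq_trib (n : Int) : NewStair_alt n = trib n.toNat := by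
  show (powLoop n.toNat mStep mId).g * 2 + (powLoop n.toNat mStep mId).h * 1 +
    (powLoop n.toNat mStep mId).i * 1 = trib n.toNat
  rw [powLoop_eq, mmul_id_left]
  have := mpow_row n.toNat
  omega

-- the dict built by A's loop: getD j 0 = trib j for every 1 ≤ j ≤ n
def aDict0 : Std.HashMap Int Int := (((∅ : Std.HashMap Int Int).insert 1 1).insert 2 2).insert 3 4

def aLoop (n : Int) : Std.HashMap Int Int :=
  (PySem.List.pyRange 4 (n + 1) 1).foldl
    (fun d i => d.insert i (d.getD (i - 1) 0 + d.getD (i - 2) 0 + d.getD (i - 3) 0)) aDict0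

theorem aLoop_inv (m : Nat) : ∀ j : Int, 1 ≤ j → j ≤ 3 + (m : Int) →
    (aLoop (3 + (m : Int))).getD j 0 = trib j.toNat := by
  induction m with
  | zero =>
      intro j h1 h2
      have : j = 1 ∨ j = 2 ∨ j = 3 := by omega
      unfold aLoop
      rw [PySem.List.pyRange_one_eq_nil (by omega)]
      rcases this with h | h | h <;> subst h <;>
        simp [aDict0, Std.HashMap.getD_insert, trib]
  | succ m ih =>
      intro j h1 h2
      have hsplit : (3 : Int) + (↑(m + 1)) + 1 = (3 + (m : Int) + 1) + 1 := by push_cast; ring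
      unfold aLoop
      rw [hsplit, PySem.List.pyRange_one_succ_right (by omega), List.foldl_append]
      have hprev : ∀ i : Int, 1 ≤ i → i ≤ 3 + (m : Int) →
          ((PySem.List.pyRange 4 (3 + (m : Int) + 1) 1).foldl
            (fun d i => d.insert i (d.getD (i - 1) 0 + d.getD (i - 2) 0 + d.getD (i - 3) 0)) aDict0).getD i 0
            = trib i.toNat := by
        intro i hi1 hi2
        have := ih i hi1 hi2
        unfold aLoop at this
        exact this
      simp only [List.foldl_cons, List.foldl_nil]
      set d := (PySem.List.pyRange 4 (3 + (m : Int) + 1) 1).foldl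
        (fun d i => d.insert i (d.getD (i - 1) 0 + d.getD (i - 2) 0 + d.getD (i - 3) 0)) aDict0 with hd
      have hnew : 3 + (m : Int) + 1 = 4 + (m : Int) := by ring
      rw [hnew]
      by_cases hj : j = 4 + (m : Int)
      · subst hj
        rw [Std.HashMap.getD_insert]
        simp only [beq_iff_eq, if_true]
        have g1 : d.getD (4 + (m : Int) - 1) 0 = trib (m + 3) := by
          rw [hprev _ (by omega) (by omega)]; congr 1; omega
        have g2 : d.getD (4 + (m : Int) - 2) 0 = trib (m + 2) := by
          rw [hprev _ (by omega) (by omega)]; congr 1; omega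
        have g3 : d.getD (4 + (m : Int) - 3) 0 = trib (m + 1) := by
          rw [hprev _ (by omega) (by omega)]; congr 1; omega
        have htn : (4 + (m : Int)).toNat = (m + 1) + 3 := by omega
        rw [htn, trib, g1, g2, g3]
      · rw [Std.HashMap.getD_insert]
        simp only [beq_iff_eq]
        rw [if_neg (by omega)]
        exact hprev j h1 (by push_cast at h2; omega)

theorem a_eq_trib (n : Int) (h : 1 ≤ n) : NewStair n = trib n.toNat := by
  by_cases h1 : n = 1
  · subst h1; decide
  by_cases h2 : n = 2
  · subst h2; decide
  by_cases h3 : n = 3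
  · subst h3; decide
  · have h4 : 3 ≤ n := by omega
    have hm : n = 3 + ((n - 3).toNat : Int) := by omega
    have := aLoop_inv (n - 3).toNat n h (by omega)
    rw [← hm] at this
    unfold NewStair
    simp only [h1, h2, h3, if_false]
    unfold aLoop aDict0 at this
    exact this

-- ===== VERDICT (by name: the statement is the Claim_ definition above) =====
theorem NewStair_spec : Claim_equal_NewStair := by
  intro n _ hpre
  unfold Spec_NewStair
  rw [a_eq_trib n hpre, alt_eq_trib]

@[simp] theorem NewStair_raises : Claim_raises_NewStair := by
  unfold Claim_raises_NewStair
  exact ⟨fun n _ hr hp => by unfold Raises_NewStair at hr; unfold Pre_NewStair at hp; omega,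
    by refine ⟨by decide, by decide, by rw [alt_eq_trib]; decide⟩⟩
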